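-- pv_equiv track=rewrite | github.com/avih7531/headline-structure-analysis | analyze_structure.py | simplify_pos_pattern
-- ===== SOURCE A (Python) =====
-- def simplify_pos_pattern(pos_pattern, collapse_repetitions=False):
--     """
--     Simplify POS patterns by grouping similar structures.
--     PROPN -> N (noun-like)
--     NOUN -> N
--     VERB -> V
--     AUX -> V (auxiliary verbs)
--     ADJ -> A
--     ADV -> ADV
--     NUM -> NUM
--     PUNCT -> (removed)
--     Others -> X
--
--     If collapse_repetitions=True, collapses consecutive identical tokens:
--     N N N -> N+, V V -> V+, etc.
--     """
--     mapping = {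
--         'PROPN': 'N',
--         'NOUN': 'N',
--         'VERB': 'V',
--         'AUX': 'V',
--         'ADJ': 'A',
--         'ADV': 'ADV',
--         'NUM': 'NUM',
--         'DET': 'DET',
--         'ADP': 'P',  # Preposition
--         'PART': 'PART',
--         'CCONJ': 'C',
--         'SCONJ': 'C',
--         'PRON': 'PRON',
--     }
--
--     # Split pattern and map
--     tokens = pos_pattern.split()
--     simplified = []
--     for token in tokens:
--         if token == 'PUNCT':
--             continue  # Skip punctuation
--         simplified.append(mapping.get(token, 'X'))
--
--     if not collapse_repetitions:
--         return ' '.join(simplified)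
--
--     # Collapse consecutive repetitions
--     if not simplified:
--         return ''
--
--     collapsed = [simplified[0]]
--     for token in simplified[1:]:
--         if token != collapsed[-1]:
--             collapsed.append(token)
--         # If same as previous, skip (already have it)
--
--     # Add + to indicate "one or more" for readability
--     result = []
--     i = 0
--     while i < len(simplified):
--         current = simplified[i]
--         count = 1
--         while i + count < len(simplified) and simplified[i + count] == current:
--             count += 1
--
--         if count > 1:
--             result.append(f"{current}+")
--         else:
--             result.append(current)
--         i += count
--
--     return ' '.join(result)
-- ===== SOURCE B (Python) =====
-- def simplify_pos_pattern(pos_pattern, collapse_repetitions=False):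
--     mapping = {
--         'PROPN': 'N',
--         'NOUN': 'N',
--         'VERB': 'V',
--         'AUX': 'V',
--         'ADJ': 'A',
--         'ADV': 'ADV',
--         'NUM': 'NUM',
--         'DET': 'DET',
--         'ADP': 'P',  # Preposition
--         'PART': 'PART',
--         'CCONJ': 'C',
--         'SCONJ': 'C',
--         'PRON': 'PRON',
--     }
--     tokens = pos_pattern.split()
--     if not collapse_repetitions:
--         return ' '.join(mapping.get(t, 'X') for t in tokens if t != 'PUNCT')
--     # Single streaming pass: skip PUNCT, map, and run-length-collapse on the fly.
--     parts = []
--     cur = None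
--     cnt = 0
--     for t in tokens:
--         if t == 'PUNCT':
--             continue
--         m = mapping.get(t, 'X')
--         if cur is None:
--             cur, cnt = m, 1
--         elif m == cur:
--             cnt += 1
--         else:
--             parts.append(cur + '+' if cnt > 1 else cur)
--             cur, cnt = m, 1
--     if cur is not None:
--         parts.append(cur + '+' if cnt > 1 else cur)
--     return ' '.join(parts)
-- ===== Notes on version B (the rewrite author's own statement) =====
-- stated objective: simpler
-- what changed: Replaces A's build-an-intermediate-list-then-rescan-with-index/while-loops (plus a dead 'collapsed' list) by a single streaming pass that skips PUNCT, maps each token and run-length-collapses on the fly with a (current, count) accumulator.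
import Mathlib
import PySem

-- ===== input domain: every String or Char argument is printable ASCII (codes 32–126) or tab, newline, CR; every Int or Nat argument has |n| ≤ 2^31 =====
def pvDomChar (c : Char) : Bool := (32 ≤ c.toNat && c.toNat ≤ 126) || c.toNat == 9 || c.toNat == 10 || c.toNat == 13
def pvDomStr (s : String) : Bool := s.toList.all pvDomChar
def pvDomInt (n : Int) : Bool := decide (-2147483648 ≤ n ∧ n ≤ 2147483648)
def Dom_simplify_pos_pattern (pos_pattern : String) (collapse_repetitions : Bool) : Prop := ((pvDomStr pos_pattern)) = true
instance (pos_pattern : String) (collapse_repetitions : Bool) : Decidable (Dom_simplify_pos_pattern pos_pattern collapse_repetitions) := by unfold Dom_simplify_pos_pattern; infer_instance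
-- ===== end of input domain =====

-- B replaces A's build-an-intermediate-list-then-rescan (index/while run-length pass, plus a dead
-- `collapsed` list) by a single streaming pass keeping a (current, count) accumulator; same cost, simpler.


-- ===== PORT A =====
-- the mapping dict (verbatim in both Pythons)
def posMapping : PySem.Dict String String := PySem.Dict.ofList
  [("PROPN", "N"), ("NOUN", "N"), ("VERB", "V"), ("AUX", "V"), ("ADJ", "A"),
   ("ADV", "ADV"), ("NUM", "NUM"), ("DET", "DET"), ("ADP", "P"), ("PART", "PART"),
   ("CCONJ", "C"), ("SCONJ", "C"), ("PRON", "PRON")]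

-- inner while loop: `while i + count < len(simplified) and simplified[i+count] == current: count += 1`
-- (returns the number of increments; j plays the role of i + count)
def runA (l : List String) (c : String) (j : Nat) : Nat :=
  if h : j < l.length ∧ l.getD j "" = c then 1 + runA l c (j + 1) else 0
termination_by l.length - j
decreasing_by omega

-- outer while loop building `result`
def collectA (l : List String) (i : Nat) : List String :=
  if h : i < l.length then
    let current := l.getD i ""
    let count := 1 + runA l current (i + 1)
    (if count > 1 then current ++ "+" else current) :: collectA l (i + count)
  else []
termination_by l.length - i
decreasing_by omega

def simplify_pos_pattern (pos_pattern : String) (collapse_repetitions : Bool) : String :=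
  let tokens := PySem.Str.split₀ pos_pattern
  let simplified := tokens.foldl
    (fun acc token => if token = "PUNCT" then acc else acc ++ [posMapping.getD token "X"]) []
  if collapse_repetitions = false then PySem.Str.join " " simplified
  else if simplified = [] then ""
  else
    -- dead code in A: `collapsed` is built and never used
    let _collapsed := (simplified.drop 1).foldl
      (fun acc token => if token ≠ acc.getLastD "" then acc ++ [token] else acc)
      [simplified.getD 0 ""]
    PySem.Str.join " " (collectA simplified 0)

-- ===== PORT B =====
def flushB (cur : String) (cnt : Nat) : String := if cnt > 1 then cur ++ "+" else cur

-- the streaming loop: state = None | (current run value, its count so far)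
def streamB : List String → Option (String × Nat) → List String
  | [], none => []
  | [], some (cur, cnt) => [flushB cur cnt]
  | t :: ts, st =>
    if t = "PUNCT" then streamB ts st
    else
      let m := posMapping.getD t "X"
      match st with
      | none => streamB ts (some (m, 1))
      | some (cur, cnt) =>
        if m = cur then streamB ts (some (cur, cnt + 1))
        else flushB cur cnt :: streamB ts (some (m, 1))

def simplify_pos_pattern_alt (pos_pattern : String) (collapse_repetitions : Bool) : String :=
  let tokens := PySem.Str.split₀ pos_pattern
  if collapse_repetitions = false then
    PySem.Str.join " " ((tokens.filter (fun t => t ≠ "PUNCT")).map (fun t => posMapping.getD t "X"))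
  else
    PySem.Str.join " " (streamB tokens none)

-- ===== PRECONDITION & SPEC =====
def Spec_simplify_pos_pattern (pos_pattern : String) (collapse_repetitions : Bool) (out : String) : Prop := out = simplify_pos_pattern_alt pos_pattern collapse_repetitions
instance (pos_pattern : String) (collapse_repetitions : Bool) (out : String) : Decidable (Spec_simplify_pos_pattern pos_pattern collapse_repetitions out) := by unfold Spec_simplify_pos_pattern; infer_instance

-- ===== CLAIM (what is proved, stated in full; the proofs are below) =====
def Claim_equal_simplify_pos_pattern : Prop := ∀ (pos_pattern : String) (collapse_repetitions : Bool), Dom_simplify_pos_pattern pos_pattern collapse_repetitions → Spec_simplify_pos_pattern pos_pattern collapse_repetitions (simplify_pos_pattern pos_pattern collapse_repetitions)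

-- ===== LEMMAS AND PROOFS =====

-- skip-PUNCT-and-map, as one filterMap
def mtok (t : String) : Option String :=
  if t = "PUNCT" then none else some (posMapping.getD t "X")

-- runs of a list, abstractly (the common form both loops are reduced to)
def runsR : List String → List String
  | [] => []
  | c :: rest =>
    flushB c (1 + (rest.takeWhile (· == c)).length) :: runsR (rest.dropWhile (· == c))
termination_by l => l.length
decreasing_by
  exact Nat.lt_succ_of_le (List.length_dropWhile_le _ _)

theorem filterMap_mtok_punct (ts : List String) :
    ("PUNCT" :: ts).filterMap mtok = ts.filterMap mtok := by
  simp [mtok]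

theorem filterMap_mtok_ne {t : String} (ts : List String) (h : t ≠ "PUNCT") :
    (t :: ts).filterMap mtok = posMapping.getD t "X" :: ts.filterMap mtok := by
  simp [mtok, h]

theorem dropWhile_eq_drop_len_takeWhile (p : String → Bool) (l : List String) :
    l.dropWhile p = l.drop (l.takeWhile p).length := by
  conv_rhs => rw [← List.takeWhile_append_dropWhile (p := p) (l := l)]
  rw [List.drop_left' (by simp)]

theorem foldl_simplified (ts : List String) (acc : List String) :
    ts.foldl (fun acc token => if token = "PUNCT" then acc
      else acc ++ [posMapping.getD token "X"]) acc = acc ++ ts.filterMap mtok := by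
  induction ts generalizing acc with
  | nil => simp
  | cons t ts ih =>
    by_cases h : t = "PUNCT"
    · subst h; rw [filterMap_mtok_punct]; simpa using ih acc
    · rw [filterMap_mtok_ne ts h]
      simp [List.foldl_cons, h, ih]
theorem filterMap_mtok_eq_map_filter (ts : List String) :
    ts.filterMap mtok = (ts.filter (fun t => t ≠ "PUNCT")).map (fun t => posMapping.getD t "X") := by
  induction ts with
  | nil => rfl
  | cons t ts ih =>
    by_cases h : t = "PUNCT"
    · subst h; rw [filterMap_mtok_punct]; simp [ih]
    · rw [filterMap_mtok_ne ts h]; simp [h, ih]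

theorem runA_eq (l : List String) (c : String) (j : Nat) :
    runA l c j = ((l.drop j).takeWhile (· == c)).length := by
  rw [runA]
  split
  · rename_i h
    rw [List.drop_eq_getElem_cons h.1, runA_eq l c (j + 1)]
    have hc : l[j] = c := by rw [← List.getD_eq_getElem l "" h.1]; exact h.2
    simp [hc]
    omega
  · rename_i h
    by_cases hj : j < l.length
    · have hne : l[j] ≠ c := by
        intro hc; exact h ⟨hj, by rw [List.getD_eq_getElem l "" hj]; exact hc⟩
      rw [List.drop_eq_getElem_cons hj, List.takeWhile_cons]
      simp [hne]
    · rw [List.drop_eq_nil_of_le (by omega)]; simp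
termination_by l.length - j
decreasing_by omega

theorem collectA_eq (l : List String) (i : Nat) :
    collectA l i = runsR (l.drop i) := by
  rw [collectA]
  split
  · rename_i h
    have hget : l.getD i "" = l[i] := List.getD_eq_getElem l "" h
    have hd : l.drop i = l[i] :: l.drop (i + 1) := List.drop_eq_getElem_cons h
    show ((if 1 + runA l (l.getD i "") (i + 1) > 1 then l.getD i "" ++ "+" else l.getD i "")
        :: collectA l (i + (1 + runA l (l.getD i "") (i + 1)))) = _
    have hrun : runA l (l.getD i "") (i + 1) = ((l.drop (i + 1)).takeWhile (· == l[i])).length := by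
      rw [runA_eq, hget]
    have hrec : collectA l (i + (1 + runA l (l.getD i "") (i + 1)))
        = runsR ((l.drop (i + 1)).dropWhile (· == l[i])) := by
      rw [collectA_eq]
      congr 1
      rw [dropWhile_eq_drop_len_takeWhile, List.drop_drop, ← hrun, hget]
      congr 1
      omega
    rw [hd, runsR, hrec, hrun, hget]
    simp [flushB]
  · rename_i h
    rw [List.drop_eq_nil_of_le (by omega)]
    simp [runsR]
termination_by l.length - i
decreasing_by
  have : 1 ≤ 1 + runA l (l.getD i "") (i + 1) := by omega
  omega

theorem streamB_some (ts : List String) (cur : String) (cnt : Nat) :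
    streamB ts (some (cur, cnt)) =
      flushB cur (cnt + ((ts.filterMap mtok).takeWhile (· == cur)).length)
        :: runsR ((ts.filterMap mtok).dropWhile (· == cur)) := by
  induction ts generalizing cur cnt with
  | nil => simp [streamB, runsR]
  | cons t ts ih =>
    by_cases h : t = "PUNCT"
    · subst h; rw [filterMap_mtok_punct]; simpa [streamB] using ih cur cnt
    · rw [filterMap_mtok_ne ts h, List.takeWhile_cons, List.dropWhile_cons]
      by_cases hm : posMapping.getD t "X" = cur
      · have hb : (posMapping.getD t "X" == cur) = true := by simp [hm]
        rw [hb]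
        simp only [streamB, if_neg h, if_pos hm, ih, if_true, List.length_cons]
        have harith : cnt + 1 + ((ts.filterMap mtok).takeWhile (· == cur)).length
            = cnt + (((ts.filterMap mtok).takeWhile (· == cur)).length + 1) := by omega
        rw [harith]
      · have hb : (posMapping.getD t "X" == cur) = false := beq_eq_false_iff_ne.mpr hm
        rw [hb]
        simp only [streamB, if_neg h, if_neg hm, ih, Bool.false_eq_true, if_false,
          List.length_nil, Nat.add_zero]
        rw [runsR]

theorem streamB_none (ts : List String) :
    streamB ts none = runsR (ts.filterMap mtok) := by
  induction ts with
  | nil => simp [streamB, runsR]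
  | cons t ts ih =>
    by_cases h : t = "PUNCT"
    · subst h; rw [filterMap_mtok_punct]; simpa [streamB] using ih
    · rw [filterMap_mtok_ne ts h, runsR]
      simp only [streamB, if_neg h]
      rw [streamB_some]

-- ===== VERDICT (by name: the statement is the Claim_ definition above) =====
theorem simplify_pos_pattern_spec : Claim_equal_simplify_pos_pattern := by
  intro pos_pattern collapse_repetitions _
  unfold Spec_simplify_pos_pattern
  show simplify_pos_pattern pos_pattern collapse_repetitions = _
  simp only [simplify_pos_pattern, simplify_pos_pattern_alt, foldl_simplified, List.nil_append]
  cases collapse_repetitions with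
  | false => simp [filterMap_mtok_eq_map_filter]
  | true =>
    simp only [Bool.true_eq_false, if_false]
    rw [streamB_none, collectA_eq]
    by_cases hnil : (PySem.Str.split₀ pos_pattern).filterMap mtok = []
    · simp [hnil, runsR, PySem.Str.join]
    · simp [hnil]
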